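-- pv_equiv track=rewrite | github.com/pataluc/AoC | 2025/flipflop/puzzle02/ex.py | ex2
-- ===== SOURCE A (Python) =====
-- def ex2(data: str) -> int:
--     """Solve ex2"""
--
--     result = 0
--     pos = 0
--     last = ''
--     i = 1
--
--     for c in list(data):
--         if c == last:
--             i += 1
--         else:
--             i = 1
--         last = c
--         if c == '^':
--             pos += i
--         else:
--             pos -= i
--         result = max(result, pos)
--
--     return result
-- ===== SOURCE B (Python) =====
-- def ex2(data: str) -> int:
--     """Solve ex2 by maximal runs: a run of L equal chars moves pos by the
--     triangular number L*(L+1)//2; only '^' runs can set a new maximum."""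
--     result = 0
--     pos = 0
--     i = 0
--     n = len(data)
--     while i < n:
--         c = data[i]
--         j = i
--         while j < n and data[j] == c:
--             j += 1
--         L = j - i
--         s = L * (L + 1) // 2
--         if c == '^':
--             pos += s
--             if pos > result:
--                 result = pos
--         else:
--             pos -= s
--         i = j
--     return result
-- ===== Notes on version B (the rewrite author's own statement) =====
-- stated objective: alternative
-- what changed: B splits the string into maximal runs of equal characters and applies the closed-form triangular sum L*(L+1)//2 per run (checking a new maximum only after '^' runs), instead of A's per-character run counter with a max update at every step.
import Mathlib
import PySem

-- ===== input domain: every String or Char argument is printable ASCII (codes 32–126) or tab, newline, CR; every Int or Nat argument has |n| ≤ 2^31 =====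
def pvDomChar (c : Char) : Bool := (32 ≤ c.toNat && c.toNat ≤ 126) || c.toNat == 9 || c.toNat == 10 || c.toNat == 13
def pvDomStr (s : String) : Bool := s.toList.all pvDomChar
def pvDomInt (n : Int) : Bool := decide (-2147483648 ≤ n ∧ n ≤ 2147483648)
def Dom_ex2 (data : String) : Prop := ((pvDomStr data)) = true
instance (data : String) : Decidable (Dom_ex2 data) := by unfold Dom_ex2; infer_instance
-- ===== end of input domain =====

-- B replaces A's per-character run counter by a maximal-run decomposition with a
-- closed-form triangular sum per run (objective: alternative decomposition; same O(n)).


-- ===== PORT A =====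
-- state: (result, pos, last, i); Python's initial last = '' never equals a char, so last : Option Char, none initially
def ex2Step (st : Int × Int × Option Char × Int) (c : Char) : Int × Int × Option Char × Int :=
  let (res, pos, last, i) := st
  let i' := if some c = last then i + 1 else 1
  let pos' := if c = '^' then pos + i' else pos - i'
  (max res pos', pos', some c, i')

def ex2 (data : String) : Int :=
  (data.toList.foldl ex2Step (0, 0, none, 1)).1

-- ===== PORT B =====
-- recursion over maximal runs (Source B's inner scanning while-loop = takeWhile/dropWhile)
def ex2AltGo (res pos : Int) : List Char → Int
  | [] => res
  | c :: rest =>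
    let m := (rest.takeWhile (· == c)).length
    let L : Int := 1 + (m : Int)
    let s := PySem.Int.floordiv (L * (L + 1)) 2
    let rest' := rest.dropWhile (· == c)
    if c = '^' then
      let pos' := pos + s
      ex2AltGo (if pos' > res then pos' else res) pos' rest'
    else
      ex2AltGo res (pos - s) rest'
termination_by l => l.length
decreasing_by
  all_goals
    have h := List.length_dropWhile_le (fun x => x == c) rest
    simp only [List.length_cons]
    omega

def ex2_alt (data : String) : Int := ex2AltGo 0 0 data.toList

-- ===== PRECONDITION & SPEC =====
def Spec_ex2 (data : String) (out : Int) : Prop := out = ex2_alt data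
instance (data : String) (out : Int) : Decidable (Spec_ex2 data out) := by unfold Spec_ex2; infer_instance

-- ===== CLAIM (what is proved, stated in full; the proofs are below) =====
def Claim_equal_ex2 : Prop := ∀ (data : String), Dom_ex2 data → Spec_ex2 data (ex2 data)

-- ===== LEMMAS AND PROOFS =====

def triInt (k : Nat) : Int := ((k * (k + 1)) / 2 : Nat)

lemma triInt_nonneg (k : Nat) : 0 ≤ triInt k := Int.natCast_nonneg _

lemma triInt_succ (k : Nat) : triInt (k + 1) = triInt k + (k + 1) := by
  unfold triInt
  obtain ⟨t, ht⟩ := Nat.even_mul_succ_self k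
  have h1 : k * (k + 1) = 2 * t := by omega
  have h2 : (k + 1) * ((k + 1) + 1) = k * (k + 1) + 2 * (k + 1) := by ring
  have e1 : (k + 1) * ((k + 1) + 1) / 2 = t + (k + 1) := by omega
  have e2 : k * (k + 1) / 2 = t := by omega
  rw [e1, e2]; push_cast; ring

-- an increasing '^' run of length k, counter i ≥ 0, record res ≥ pos
lemma foldl_run_up (rest : List Char) : ∀ (k : Nat) (res pos i : Int), pos ≤ res → 0 ≤ i →
    List.foldl ex2Step (res, pos, some '^', i) (List.replicate k '^' ++ rest)
      = List.foldl ex2Step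
          (max res (pos + k * i + triInt k), pos + k * i + triInt k, some '^', i + k) rest := by
  intro k
  induction k with
  | zero =>
    intro res pos i hres _
    simp [triInt, max_eq_left hres]
  | succ k ih =>
    intro res pos i hres hi
    rw [List.replicate_succ, List.cons_append, List.foldl_cons]
    have hstep : ex2Step (res, pos, some '^', i) '^'
        = (max res (pos + (i + 1)), pos + (i + 1), some '^', i + 1) := by
      simp [ex2Step]
    rw [hstep, ih _ _ _ (le_max_right _ _) (by omega)]
    have htn := triInt_nonneg k
    congr 1
    simp only [Prod.mk.injEq]
    refine ⟨?_, ?_, trivial, ?_⟩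
    · push_cast
      rw [triInt_succ]
      have hb : 0 ≤ (k : Int) * (i + 1) := mul_nonneg (Int.natCast_nonneg _) (by omega)
      have hrel : ((k : Int) + 1) * i = (k : Int) * (i + 1) + i - k := by ring
      rw [hrel]
      generalize (k : Int) * (i + 1) = b at hb ⊢
      omega
    · push_cast
      rw [triInt_succ]
      ring
    · push_cast
      ring

-- a non-'^' run of length k: pos only falls, so the record res never changes
lemma foldl_run_down (c : Char) (hc : ¬ c = '^') (rest : List Char) :
    ∀ (k : Nat) (res pos i : Int), pos ≤ res → 0 ≤ i →
    List.foldl ex2Step (res, pos, some c, i) (List.replicate k c ++ rest)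
      = List.foldl ex2Step (res, pos - k * i - triInt k, some c, i + k) rest := by
  intro k
  induction k with
  | zero =>
    intro res pos i hres _
    simp [triInt]
  | succ k ih =>
    intro res pos i hres hi
    rw [List.replicate_succ, List.cons_append, List.foldl_cons]
    have hstep : ex2Step (res, pos, some c, i) c
        = (res, pos - (i + 1), some c, i + 1) := by
      simp [ex2Step, hc, max_eq_left (show pos - (i + 1) ≤ res by omega)]
    rw [hstep, ih _ _ _ (by omega) (by omega)]
    congr 1
    simp only [Prod.mk.injEq]
    refine ⟨trivial, ?_, trivial, ?_⟩
    · push_cast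
      rw [triInt_succ]
      ring
    · push_cast
      ring

lemma head?_dropWhile_not {α : Type} (p : α → Bool) :
    ∀ (l : List α) (x : α), (l.dropWhile p).head? = some x → p x = false := by
  intro l
  induction l with
  | nil => intro x h; simp [List.dropWhile] at h
  | cons a l ih =>
    intro x h
    rw [List.dropWhile_cons] at h
    by_cases hp : p a
    · exact ih x (by simpa [hp] using h)
    · simp [hp] at h; subst h; simpa using hp

lemma takeWhile_eq_replicate (c : Char) (l : List Char) :
    l.takeWhile (· == c) = List.replicate (l.takeWhile (· == c)).length c := by
  rw [List.eq_replicate_iff]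
  exact ⟨rfl, fun b hb => by simpa using List.mem_takeWhile_imp hb⟩

lemma floordiv_tri (m : Nat) :
    PySem.Int.floordiv ((1 + (m : Int)) * ((1 + (m : Int)) + 1)) 2 = 1 + (m : Int) + triInt m := by
  have hc : (1 + (m : Int)) * ((1 + (m : Int)) + 1) = (((m + 1) * (m + 2) : Nat) : Int) := by
    push_cast; ring
  rw [hc]
  have := PySem.Int.floordiv_natCast ((m + 1) * (m + 2)) 2
  rw [show ((2:Int)) = ((2:Nat):Int) by norm_num, this]
  have h := triInt_succ m
  unfold triInt at h ⊢
  have : (m + 1) * (m + 2) = (m + 1) * ((m + 1) + 1) := by ring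
  rw [this]
  omega

lemma main_lemma : ∀ (n : Nat) (l : List Char), l.length ≤ n →
    ∀ (res pos i : Int) (last : Option Char), pos ≤ res →
    (∀ c, l.head? = some c → last ≠ some c) →
    (List.foldl ex2Step (res, pos, last, i) l).1 = ex2AltGo res pos l := by
  intro n
  induction n with
  | zero =>
    intro l hl res pos i last hres _
    have : l = [] := List.eq_nil_of_length_eq_zero (by omega)
    subst this
    simp [ex2AltGo]
  | succ n ih =>
    intro l hl res pos i last hres hhead
    cases l with
    | nil => simp [ex2AltGo]
    | cons c rest =>
      have hlast : ¬ (some c = last) := fun h => hhead c rfl h.symm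
      have hsplit : rest = rest.takeWhile (· == c) ++ rest.dropWhile (· == c) :=
        (List.takeWhile_append_dropWhile).symm
      set m := (rest.takeWhile (· == c)).length with hm
      have hrep : rest.takeWhile (· == c) = List.replicate m c := takeWhile_eq_replicate c rest
      have hlen' : (rest.dropWhile (· == c)).length ≤ n := by
        have := List.length_dropWhile_le (· == c) rest
        simp only [List.length_cons] at hl; omega
      have hhead' : ∀ c', (rest.dropWhile (· == c)).head? = some c' → (some c : Option Char) ≠ some c' := by
        intro c' h hcc
        have := head?_dropWhile_not (· == c) rest c' h
        cases hcc; simp at this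
      have htn := triInt_nonneg m
      by_cases hc : c = '^'
      · subst hc
        have hstep1 : ex2Step (res, pos, last, i) '^' = (max res (pos + 1), pos + 1, some '^', 1) := by
          simp [ex2Step, hlast]
        rw [List.foldl_cons, hstep1]
        conv_lhs => rw [hsplit, hrep]
        rw [foldl_run_up _ m _ _ 1 (le_max_right _ _) (by omega)]
        rw [ih _ hlen' _ _ _ _ (le_max_right _ _) hhead']
        rw [ex2AltGo]
        simp only [← hm, floordiv_tri m]
        have hp : pos + 1 + (m : Int) * 1 + triInt m = pos + (1 + (m : Int) + triInt m) := by ring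
        rw [hp]
        congr 1
        have hone : (1 : Int) ≤ 1 + (m : Int) + triInt m := by
          have : (0 : Int) ≤ (m : Int) := Int.natCast_nonneg _
          omega
        split_ifs with h <;> omega
      · have hstep1 : ex2Step (res, pos, last, i) c = (res, pos - 1, some c, 1) := by
          simp [ex2Step, hlast, hc, max_eq_left (show pos - 1 ≤ res by omega)]
        rw [List.foldl_cons, hstep1]
        conv_lhs => rw [hsplit, hrep]
        rw [foldl_run_down c hc _ m _ _ 1 (by omega) (by omega)]
        rw [ih _ hlen' _ _ _ _ (by omega) hhead']
        rw [ex2AltGo]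
        simp only [← hm, floordiv_tri m, if_neg hc]
        congr 1
        ring

-- ===== VERDICT (by name: the statement is the Claim_ definition above) =====
theorem ex2_spec : Claim_equal_ex2 := by
  intro data _
  unfold Spec_ex2 ex2 ex2_alt
  exact main_lemma data.toList.length data.toList le_rfl 0 0 1 none le_rfl
    (by intro c _ h; cases h)
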